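-- pv_equiv track=rewrite | github.com/EhsanKA/sparsesampler_reproducibility | analysis/semitones_marker_genes/literature_markers.py | get_markers_for_celltype
-- ===== SOURCE A (Python) =====
-- LITERATURE_MARKERS = {
--     'osteoblast': {
--         'markers': [
--             'RUNX2',   # Master transcription factor for osteoblast differentiation
--             'SP7',     # Osterix - essential for bone formation
--             'ALPL',    # Alkaline Phosphatase - early osteoblast marker
--             'COL1A1',  # Collagen type I - major matrix protein
--             'BGLAP',   # Osteocalcin - late marker, mature osteoblasts
--             'SPARC',   # Osteonectin
--             'SPP1',    # Osteopontin
--             'IBSP',    # Bone sialoprotein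
--         ],
--         'references': [
--             'CellMarker 2.0 (Hu et al., 2023)',
--             'PanglaoDB (Franzén et al., 2019)',
--         ]
--     },
--     'chondrocyte': {
--         'markers': [
--             'SOX9',    # Key transcription factor for chondrogenic lineage
--             'SOX5',    # Chondrogenic transcription factor
--             'SOX6',    # Chondrogenic transcription factor
--             'COL2A1',  # Collagen type II - cartilage matrix
--             'ACAN',    # Aggrecan - major proteoglycan
--             'COL10A1', # Hypertrophic chondrocyte marker
--             'COL11A1', # Cartilage collagen
--             'COMP',    # Cartilage oligomeric matrix protein
--         ],
--         'references': [
--             'CellMarker 2.0 (Hu et al., 2023)',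
--             'Ji Q., et al. (2019). Ann Rheum Dis. (PMC7724342)',
--         ]
--     },
--     'fibroblast': {
--         'markers': [
--             'VIM',     # Vimentin - mesenchymal cytoskeleton
--             'PDGFRA',  # Growth factor receptor
--             'PDGFRB',  # Growth factor receptor
--             'COL1A1',  # Collagen type I
--             'COL1A2',  # Collagen type I
--             'THY1',    # CD90 - surface marker
--             'FAP',     # Fibroblast activation protein
--             'DCN',     # Decorin
--             'LUM',     # Lumican
--         ],
--         'references': [
--             'CellMarker 2.0 (Hu et al., 2023)',
--             'PanglaoDB (Franzén et al., 2019)',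
--         ]
--     },
--     'mesodermal cell': {
--         'markers': [
--             'TBXT',    # Brachyury/T - classic mesoderm marker
--             'MIXL1',   # Early mesendoderm marker
--             'MESP1',   # Cardiac mesoderm specification
--             'EOMES',   # Mesendoderm transcription factor
--             'KDR',     # VEGFR2 - mesodermal precursors
--             'GSC',     # Goosecoid
--             'TBX6',    # T-box transcription factor
--         ],
--         'references': [
--             'CellMarker 2.0 (Hu et al., 2023)',
--             'PMID:19134196',
--         ]
--     },
--     'lateral mesodermal cell': {
--         'markers': [
--             'HAND1',   # TF, LPM specific (~98-100% of LPM cells)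
--             'FOXF1',   # Central LPM marker (~98-100% of LPM cells)
--             'GATA4',   # Downstream of BMP4 and FOXF1
--             'BMP4',    # Key signaling molecule in LPM
--             'WT1',     # Splanchnic mesenchyme marker
--             'TBX18',   # Splanchnic mesenchyme marker
--             'HAND2',   # Heart/LPM marker
--         ],
--         'references': [
--             'Loh K.M., et al. (2016). Cell, 166(2), 451-467. (PMC5474394)',
--             'Reactome Pathway: R-HSA-9758920',
--         ]
--     }
-- }
--
-- def get_markers_for_celltype(cell_type):
--     """Get marker genes for a specific cell type."""
--     # Normalize cell type name
--     cell_type_lower = cell_type.lower().strip()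
--
--     for ct, data in LITERATURE_MARKERS.items():
--         if ct.lower() == cell_type_lower:
--             return data['markers']
--
--     # Try partial matching
--     for ct, data in LITERATURE_MARKERS.items():
--         if cell_type_lower in ct.lower() or ct.lower() in cell_type_lower:
--             return data['markers']
--
--     return []
-- ===== SOURCE B (Python) =====
-- def get_markers_for_celltype(cell_type):
--     """Get marker genes for a specific cell type (single pass over the table)."""
--     cell_type_lower = cell_type.lower().strip()
--     partial = None
--     for ct, data in LITERATURE_MARKERS.items():
--         ct_lower = ct.lower()
--         if ct_lower == cell_type_lower:
--             return data['markers']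
--         if partial is None and (cell_type_lower in ct_lower or ct_lower in cell_type_lower):
--             partial = data['markers']
--     return partial if partial is not None else []
--
--
-- LITERATURE_MARKERS = {
--     'osteoblast': {
--         'markers': ['RUNX2', 'SP7', 'ALPL', 'COL1A1', 'BGLAP', 'SPARC', 'SPP1', 'IBSP'],
--         'references': ['CellMarker 2.0 (Hu et al., 2023)', 'PanglaoDB (Franzén et al., 2019)'],
--     },
--     'chondrocyte': {
--         'markers': ['SOX9', 'SOX5', 'SOX6', 'COL2A1', 'ACAN', 'COL10A1', 'COL11A1', 'COMP'],
--         'references': ['CellMarker 2.0 (Hu et al., 2023)', 'Ji Q., et al. (2019). Ann Rheum Dis. (PMC7724342)'],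
--     },
--     'fibroblast': {
--         'markers': ['VIM', 'PDGFRA', 'PDGFRB', 'COL1A1', 'COL1A2', 'THY1', 'FAP', 'DCN', 'LUM'],
--         'references': ['CellMarker 2.0 (Hu et al., 2023)', 'PanglaoDB (Franzén et al., 2019)'],
--     },
--     'mesodermal cell': {
--         'markers': ['TBXT', 'MIXL1', 'MESP1', 'EOMES', 'KDR', 'GSC', 'TBX6'],
--         'references': ['CellMarker 2.0 (Hu et al., 2023)', 'PMID:19134196'],
--     },
--     'lateral mesodermal cell': {
--         'markers': ['HAND1', 'FOXF1', 'GATA4', 'BMP4', 'WT1', 'TBX18', 'HAND2'],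
--         'references': ['Loh K.M., et al. (2016). Cell, 166(2), 451-467. (PMC5474394)', 'Reactome Pathway: R-HSA-9758920'],
--     },
-- }
-- ===== Notes on version B (the rewrite author's own statement) =====
-- stated objective: simpler
-- what changed: Replaces A's two sequential scans of the marker table (exact pass, then partial pass) with a single pass that returns immediately on an exact match and records only the first partial-match candidate.
import Mathlib
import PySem

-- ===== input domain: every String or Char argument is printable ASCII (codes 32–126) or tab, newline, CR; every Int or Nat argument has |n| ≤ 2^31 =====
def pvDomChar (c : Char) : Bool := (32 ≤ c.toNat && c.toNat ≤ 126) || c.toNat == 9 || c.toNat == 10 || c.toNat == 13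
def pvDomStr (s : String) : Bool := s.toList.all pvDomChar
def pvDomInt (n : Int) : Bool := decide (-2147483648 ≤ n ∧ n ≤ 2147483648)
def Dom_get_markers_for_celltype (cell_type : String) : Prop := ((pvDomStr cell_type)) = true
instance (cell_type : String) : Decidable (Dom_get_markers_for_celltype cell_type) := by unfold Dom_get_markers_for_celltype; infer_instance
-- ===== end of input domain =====

-- B merges A's two sequential scans (exact pass, then partial pass) into one pass that
-- returns on an exact match and keeps the first partial candidate; objective: simpler.

-- ===== PORT A =====
-- LITERATURE_MARKERS: entries are (cell-type name, (markers, references))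
def literatureMarkers : List (String × (List String × List String)) :=
  [ ("osteoblast",
      (["RUNX2", "SP7", "ALPL", "COL1A1", "BGLAP", "SPARC", "SPP1", "IBSP"],
       ["CellMarker 2.0 (Hu et al., 2023)", "PanglaoDB (Franzén et al., 2019)"])),
    ("chondrocyte",
      (["SOX9", "SOX5", "SOX6", "COL2A1", "ACAN", "COL10A1", "COL11A1", "COMP"],
       ["CellMarker 2.0 (Hu et al., 2023)", "Ji Q., et al. (2019). Ann Rheum Dis. (PMC7724342)"])),
    ("fibroblast",
      (["VIM", "PDGFRA", "PDGFRB", "COL1A1", "COL1A2", "THY1", "FAP", "DCN", "LUM"],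
       ["CellMarker 2.0 (Hu et al., 2023)", "PanglaoDB (Franzén et al., 2019)"])),
    ("mesodermal cell",
      (["TBXT", "MIXL1", "MESP1", "EOMES", "KDR", "GSC", "TBX6"],
       ["CellMarker 2.0 (Hu et al., 2023)", "PMID:19134196"])),
    ("lateral mesodermal cell",
      (["HAND1", "FOXF1", "GATA4", "BMP4", "WT1", "TBX18", "HAND2"],
       ["Loh K.M., et al. (2016). Cell, 166(2), 451-467. (PMC5474394)",
        "Reactome Pathway: R-HSA-9758920"])) ]

-- A's first loop: 'for ct, data in LITERATURE_MARKERS.items(): if ct.lower() == cell_type_lower: return data["markers"]'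
def aExactScan (entries : List (String × (List String × List String))) (ctl : String) :
    Option (List String) :=
  match entries with
  | [] => none
  | (ct, data) :: rest =>
      if PySem.Str.lower ct == ctl then some data.1 else aExactScan rest ctl

-- A's second loop: 'if cell_type_lower in ct.lower() or ct.lower() in cell_type_lower: return data["markers"]'
def aPartialScan (entries : List (String × (List String × List String))) (ctl : String) :
    Option (List String) :=
  match entries with
  | [] => none
  | (ct, data) :: rest =>
      if PySem.Str.isIn ctl (PySem.Str.lower ct) || PySem.Str.isIn (PySem.Str.lower ct) ctl then
        some data.1
      else aPartialScan rest ctl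

def get_markers_for_celltype (cell_type : String) : List String :=
  let cell_type_lower := PySem.Str.strip (PySem.Str.lower cell_type)
  match aExactScan literatureMarkers cell_type_lower with
  | some markers => markers
  | none =>
      match aPartialScan literatureMarkers cell_type_lower with
      | some markers => markers
      | none => []

-- ===== PORT B =====
-- B's single loop: return on the exact match, keep the first partial-match candidate.
def bScan (entries : List (String × (List String × List String))) (ctl : String)
    (partial_ : Option (List String)) : List String :=
  match entries with
  | [] => partial_.getD []
  | (ct, data) :: rest =>
      let ct_lower := PySem.Str.lower ct
      if ct_lower == ctl then data.1
      else if partial_.isNone &&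
              (PySem.Str.isIn ctl ct_lower || PySem.Str.isIn ct_lower ctl) then
        bScan rest ctl (some data.1)
      else bScan rest ctl partial_

def get_markers_for_celltype_alt (cell_type : String) : List String :=
  bScan literatureMarkers (PySem.Str.strip (PySem.Str.lower cell_type)) none

-- ===== PRECONDITION & SPEC =====
def Spec_get_markers_for_celltype (cell_type : String) (out : List String) : Prop := out = get_markers_for_celltype_alt cell_type
instance (cell_type : String) (out : List String) : Decidable (Spec_get_markers_for_celltype cell_type out) := by unfold Spec_get_markers_for_celltype; infer_instance

-- ===== CLAIM (what is proved, stated in full; the proofs are below) =====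
def Claim_equal_get_markers_for_celltype : Prop := ∀ (cell_type : String), Dom_get_markers_for_celltype cell_type → Spec_get_markers_for_celltype cell_type (get_markers_for_celltype cell_type)

-- ===== LEMMAS AND PROOFS =====

-- The single pass equals: first exact hit if any; otherwise the carried candidate
-- (or, when none is carried yet, the first partial hit, or []).
theorem bScan_eq (entries : List (String × (List String × List String))) (ctl : String)
    (partial_ : Option (List String)) :
    bScan entries ctl partial_ =
      match aExactScan entries ctl with
      | some m => m
      | none =>
          match partial_ with
          | some m => m
          | none => (aPartialScan entries ctl).getD [] := by
  induction entries generalizing partial_ with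
  | nil => cases partial_ <;> simp [bScan, aExactScan, aPartialScan]
  | cons e rest ih =>
      obtain ⟨ct, data⟩ := e
      by_cases hex : (PySem.Str.lower ct == ctl) = true
      · simp [bScan, aExactScan, hex]
      · by_cases hp : (PySem.Chars.isIn ctl.toList (PySem.Chars.lower ct.toList) = true ∨
              PySem.Chars.isIn (PySem.Chars.lower ct.toList) ctl.toList = true)
        · cases partial_ with
          | none => simp [bScan, aExactScan, aPartialScan, hex, hp, ih]
          | some m => simp [bScan, aExactScan, hex, ih]
        · cases partial_ with
          | none => simp [bScan, aExactScan, aPartialScan, hex, hp, ih]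
          | some m => simp [bScan, aExactScan, hex, ih]

-- ===== VERDICT (by name: the statement is the Claim_ definition above) =====
theorem get_markers_for_celltype_spec : Claim_equal_get_markers_for_celltype := by
  intro cell_type _
  unfold Spec_get_markers_for_celltype get_markers_for_celltype get_markers_for_celltype_alt
  rw [bScan_eq]
  cases hex : aExactScan literatureMarkers (PySem.Str.strip (PySem.Str.lower cell_type)) with
  | some m => simp [hex]
  | none =>
      simp only [hex]
      cases hp : aPartialScan literatureMarkers (PySem.Str.strip (PySem.Str.lower cell_type))
      · simp [hp]
      · simp
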